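-- pv_equiv track=rewrite | github.com/andvazva/Labeling | main.py | label_triangles
-- ===== SOURCE A (Python) =====
-- def label_triangles(triangle_vertex, labels):
--     triangle_label = []
--     for vertices in triangle_vertex:
--         label0 = labels[vertices[0]]
--         label1 = labels[vertices[1]]
--         label2 = labels[vertices[2]]
--         if (label0 == label1 == label2):
--              triangle_label.append(label2)
--         elif (label0 == label1 and label0!=label2):
--             triangle_label.append(label0)
--         elif (label1 == label2 and (label1!= label0)):
--             triangle_label.append(label1)
--         elif (label0 == label2) and (label0!=label1):
--             triangle_label.append(label0)
--         else:
--             triangle_label.append(label0)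
--     return triangle_label
-- ===== SOURCE B (Python) =====
-- def label_triangles(triangle_vertex, labels):
--     result = []
--     for v in triangle_vertex:
--         trio = (labels[v[0]], labels[v[1]], labels[v[2]])
--         result.append(max(trio, key=trio.count))
--     return result
-- ===== Notes on version B (the rewrite author's own statement) =====
-- stated objective: simpler
-- what changed: Replaces A's five-branch ==/!= majority cascade with a tally-and-pick step: the per-triangle label is max(trio, key=trio.count), whose first-maximum tie-break reproduces A's result (label0 on all-distinct) exactly.
import Mathlib
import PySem

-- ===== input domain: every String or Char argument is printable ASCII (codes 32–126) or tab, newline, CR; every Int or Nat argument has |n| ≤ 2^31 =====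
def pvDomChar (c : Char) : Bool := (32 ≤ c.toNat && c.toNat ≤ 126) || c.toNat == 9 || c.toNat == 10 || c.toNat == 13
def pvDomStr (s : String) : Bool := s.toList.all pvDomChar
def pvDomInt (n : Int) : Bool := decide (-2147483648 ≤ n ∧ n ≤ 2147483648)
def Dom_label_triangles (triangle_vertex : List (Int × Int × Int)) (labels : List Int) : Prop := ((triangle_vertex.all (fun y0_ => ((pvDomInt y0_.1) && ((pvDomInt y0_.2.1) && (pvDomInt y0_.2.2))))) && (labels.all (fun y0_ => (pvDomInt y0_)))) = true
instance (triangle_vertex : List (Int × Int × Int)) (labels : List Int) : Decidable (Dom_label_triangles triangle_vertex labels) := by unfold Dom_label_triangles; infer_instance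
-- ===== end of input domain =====

-- B replaces A's cascade of ==/!= majority branches with a tally-and-pick step
-- (max of the three labels keyed by their count, first maximum wins); objective: simpler.

-- ===== PORT A =====
-- A's loop appends to triangle_label; each labels[...] is Python indexing (pyGetD,
-- exact under Pre_'s InRange condition).
def label_triangles (triangle_vertex : List (Int × Int × Int)) (labels : List Int) : List Int :=
  triangle_vertex.foldl (fun triangle_label vertices =>
    let label0 := PySem.List.pyGetD labels vertices.1 0
    let label1 := PySem.List.pyGetD labels vertices.2.1 0
    let label2 := PySem.List.pyGetD labels vertices.2.2 0
    if label0 = label1 ∧ label1 = label2 then triangle_label ++ [label2]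
    else if label0 = label1 ∧ label0 ≠ label2 then triangle_label ++ [label0]
    else if label1 = label2 ∧ label1 ≠ label0 then triangle_label ++ [label1]
    else if label0 = label2 ∧ label0 ≠ label1 then triangle_label ++ [label0]
    else triangle_label ++ [label0]) []

-- ===== PORT B =====
-- Python max(trio, key=trio.count): first element with strictly maximal count wins.
def pyMaxByCount (xs : List Int) : Int :=
  match xs with
  | [] => 0  -- unreachable: B always applies it to a 3-element tuple
  | h :: t => t.foldl (fun best x =>
      if PySem.List.count xs best < PySem.List.count xs x then x else best) h

def label_triangles_alt (triangle_vertex : List (Int × Int × Int)) (labels : List Int) : List Int :=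
  triangle_vertex.foldl (fun result v =>
    let trio : List Int := [PySem.List.pyGetD labels v.1 0,
                            PySem.List.pyGetD labels v.2.1 0,
                            PySem.List.pyGetD labels v.2.2 0]
    result ++ [pyMaxByCount trio]) []

-- ===== PRECONDITION & SPEC =====
-- Pre_: every vertex index is a valid Python index into labels (A raises IndexError otherwise).
def Pre_label_triangles (triangle_vertex : List (Int × Int × Int)) (labels : List Int) : Prop :=
  ∀ v ∈ triangle_vertex, PySem.Raise.InRange labels.length v.1 ∧
    PySem.Raise.InRange labels.length v.2.1 ∧ PySem.Raise.InRange labels.length v.2.2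
instance (triangle_vertex : List (Int × Int × Int)) (labels : List Int) : Decidable (Pre_label_triangles triangle_vertex labels) := by unfold Pre_label_triangles; infer_instance
def pvWitness_label_triangles : (List (Int × Int × Int)) × List Int := ([(0, 1, -1), (2, 2, 0)], [5, 7, 5])

def Spec_label_triangles (triangle_vertex : List (Int × Int × Int)) (labels : List Int) (out : List Int) : Prop := out = label_triangles_alt triangle_vertex labels
instance (triangle_vertex : List (Int × Int × Int)) (labels : List Int) (out : List Int) : Decidable (Spec_label_triangles triangle_vertex labels out) := by unfold Spec_label_triangles; infer_instance

-- ===== CLAIM (what is proved, stated in full; the proofs are below) =====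
def Claim_equal_label_triangles : Prop := ∀ (triangle_vertex : List (Int × Int × Int)) (labels : List Int), Dom_label_triangles triangle_vertex labels → Pre_label_triangles triangle_vertex labels → Spec_label_triangles triangle_vertex labels (label_triangles triangle_vertex labels)

-- ===== LEMMAS AND PROOFS =====

-- the per-triangle agreement: A's branch cascade equals B's count-argmax on [a,b,c]
theorem cascade_eq_maxByCount (a b c : Int) :
    (if a = b ∧ b = c then c
     else if a = b ∧ a ≠ c then a
     else if b = c ∧ b ≠ a then b
     else if a = c ∧ a ≠ b then a
     else a) = pyMaxByCount [a, b, c] := by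
  simp only [pyMaxByCount, List.foldl, PySem.List.count_eq, List.count_cons, List.count_nil]
  by_cases hab : a = b <;> by_cases hbc : b = c <;> by_cases hac : a = c <;>
    simp_all <;> split_ifs at * <;> omega

-- one loop step of A rewritten as one loop step of B
theorem step_eq (labels : List Int) (acc : List Int) (vertices : Int × Int × Int) :
    (let label0 := PySem.List.pyGetD labels vertices.1 0
     let label1 := PySem.List.pyGetD labels vertices.2.1 0
     let label2 := PySem.List.pyGetD labels vertices.2.2 0
     if label0 = label1 ∧ label1 = label2 then acc ++ [label2]
     else if label0 = label1 ∧ label0 ≠ label2 then acc ++ [label0]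
     else if label1 = label2 ∧ label1 ≠ label0 then acc ++ [label1]
     else if label0 = label2 ∧ label0 ≠ label1 then acc ++ [label0]
     else acc ++ [label0]) =
    acc ++ [pyMaxByCount [PySem.List.pyGetD labels vertices.1 0,
                          PySem.List.pyGetD labels vertices.2.1 0,
                          PySem.List.pyGetD labels vertices.2.2 0]] := by
  rw [← cascade_eq_maxByCount]
  simp only []
  split_ifs <;> rfl

-- the two loops agree from any accumulator
theorem foldl_agree (labels : List Int) (tv : List (Int × Int × Int)) :
    ∀ acc : List Int,
      tv.foldl (fun triangle_label vertices =>
        let label0 := PySem.List.pyGetD labels vertices.1 0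
        let label1 := PySem.List.pyGetD labels vertices.2.1 0
        let label2 := PySem.List.pyGetD labels vertices.2.2 0
        if label0 = label1 ∧ label1 = label2 then triangle_label ++ [label2]
        else if label0 = label1 ∧ label0 ≠ label2 then triangle_label ++ [label0]
        else if label1 = label2 ∧ label1 ≠ label0 then triangle_label ++ [label1]
        else if label0 = label2 ∧ label0 ≠ label1 then triangle_label ++ [label0]
        else triangle_label ++ [label0]) acc =
      tv.foldl (fun result v =>
        let trio : List Int := [PySem.List.pyGetD labels v.1 0,
                                PySem.List.pyGetD labels v.2.1 0,
                                PySem.List.pyGetD labels v.2.2 0]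
        result ++ [pyMaxByCount trio]) acc := by
  induction tv with
  | nil => intro acc; rfl
  | cons v t ih =>
      intro acc
      simp only [List.foldl]
      rw [step_eq]
      exact ih _

-- ===== VERDICT (by name: the statement is the Claim_ definition above) =====
theorem label_triangles_spec : Claim_equal_label_triangles := by
  intro tv labels _ _
  exact foldl_agree labels tv []
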